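-- pv_equiv track=rewrite | github.com/le7042489-coder/gem | backend/app/utils/parsing.py | extract_diagnosis_summary
-- ===== SOURCE A (Python) =====
-- from typing import List, Optional, Dict, Any
--
-- def extract_diagnosis_summary(text: str) -> Optional[str]:
--     lines = [line.strip() for line in text.splitlines() if line.strip()]
--     for line in lines:
--         if line.lower().startswith("diagnosis"):
--             parts = line.split(":", 1)
--             return parts[1].strip() if len(parts) > 1 else None
--         if line.lower().startswith("impression"):
--             parts = line.split(":", 1)
--             return parts[1].strip() if len(parts) > 1 else None
--     for line in lines:
--         if not line.startswith("FINDING|") and not line.lower().startswith("findings"):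
--             return line
--     return None
-- ===== SOURCE B (Python) =====
-- def extract_diagnosis_summary(text):
--     fallback = None
--     for raw in text.splitlines():
--         line = raw.strip()
--         if not line:
--             continue
--         low = line.lower()
--         if low.startswith("diagnosis") or low.startswith("impression"):
--             parts = line.split(":", 1)
--             return parts[1].strip() if len(parts) > 1 else None
--         if fallback is None and not line.startswith("FINDING|") and not low.startswith("findings"):
--             fallback = line
--     return fallback
-- ===== Notes on version B (the rewrite author's own statement) =====
-- stated objective: simpler
-- what changed: Replaces A's precomputed stripped-line list and two sequential scans with a single streaming pass that returns on the first diagnosis/impression line and records the first fallback line on the fly.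
import Mathlib
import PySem

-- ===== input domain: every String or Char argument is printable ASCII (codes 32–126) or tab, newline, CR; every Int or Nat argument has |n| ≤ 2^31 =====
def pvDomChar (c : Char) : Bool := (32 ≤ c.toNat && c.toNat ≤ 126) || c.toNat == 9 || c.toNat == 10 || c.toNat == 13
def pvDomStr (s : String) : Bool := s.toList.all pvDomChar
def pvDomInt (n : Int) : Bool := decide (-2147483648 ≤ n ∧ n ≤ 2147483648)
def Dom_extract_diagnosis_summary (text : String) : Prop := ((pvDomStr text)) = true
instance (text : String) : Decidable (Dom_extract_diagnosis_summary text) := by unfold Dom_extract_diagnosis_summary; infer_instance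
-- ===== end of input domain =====

-- B is a single streaming pass (return on first diagnosis/impression line, remember the first
-- fallback line on the fly) instead of A's prebuilt stripped-line list scanned twice.

-- ===== PORT A =====
-- first loop of A: 'some r' means the loop returned the value r (r may be none), 'none' means fell through
def pvScanDiag : List String → Option (Option String)
  | [] => none
  | l :: ls =>
    if PySem.Str.startswith (PySem.Str.lower l) "diagnosis" then
      some (match PySem.Str.splitMax? l ":" 1 with
            | some (_ :: p1 :: _) => some (PySem.Str.strip p1)
            | _ => none)
    else if PySem.Str.startswith (PySem.Str.lower l) "impression" then
      some (match PySem.Str.splitMax? l ":" 1 with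
            | some (_ :: p1 :: _) => some (PySem.Str.strip p1)
            | _ => none)
    else pvScanDiag ls

-- second loop of A
def pvScanFallback : List String → Option String
  | [] => none
  | l :: ls =>
    if !(PySem.Str.startswith l "FINDING|") && !(PySem.Str.startswith (PySem.Str.lower l) "findings") then
      some l
    else pvScanFallback ls

def extract_diagnosis_summary (text : String) : Option String :=
  let lines := ((PySem.Str.splitlines text).map PySem.Str.strip).filter (fun l => l ≠ "")
  match pvScanDiag lines with
  | some r => r
  | none => pvScanFallback lines

-- ===== PORT B =====
def pvOnePass : List String → Option String → Option String
  | [], fb => fb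
  | raw :: rest, fb =>
    let line := PySem.Str.strip raw
    if line = "" then pvOnePass rest fb
    else
      let low := PySem.Str.lower line
      if PySem.Str.startswith low "diagnosis" || PySem.Str.startswith low "impression" then
        match PySem.Str.splitMax? line ":" 1 with
        | some (_ :: p1 :: _) => some (PySem.Str.strip p1)
        | _ => none
      else
        pvOnePass rest
          (if fb.isNone && !(PySem.Str.startswith line "FINDING|") && !(PySem.Str.startswith low "findings")
           then some line else fb)

def extract_diagnosis_summary_alt (text : String) : Option String :=
  pvOnePass (PySem.Str.splitlines text) none

-- ===== PRECONDITION & SPEC =====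
def Spec_extract_diagnosis_summary (text : String) (out : Option String) : Prop := out = extract_diagnosis_summary_alt text
instance (text : String) (out : Option String) : Decidable (Spec_extract_diagnosis_summary text out) := by unfold Spec_extract_diagnosis_summary; infer_instance

-- ===== CLAIM (what is proved, stated in full; the proofs are below) =====
def Claim_equal_extract_diagnosis_summary : Prop := ∀ (text : String), Dom_extract_diagnosis_summary text → Spec_extract_diagnosis_summary text (extract_diagnosis_summary text)

-- ===== LEMMAS AND PROOFS =====

-- the one-pass loop computes exactly: A's first scan over the stripped non-empty lines, and if it
-- falls through, the already-recorded fallback or else A's second scan.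
theorem pvOnePass_eq (L : List String) : ∀ fb : Option String,
    pvOnePass L fb =
      (let lines := (L.map PySem.Str.strip).filter (fun l => l ≠ "")
       match pvScanDiag lines with
       | some r => r
       | none => match fb with
                 | some f => some f
                 | none => pvScanFallback lines) := by
  induction L with
  | nil => intro fb; cases fb <;> simp [pvOnePass, pvScanDiag, pvScanFallback]
  | cons raw rest ih =>
    intro fb
    by_cases h0 : PySem.Str.strip raw = ""
    · simp [pvOnePass, h0, ih fb]
    · cases pvScanDiag ((rest.map PySem.Str.strip).filter (fun l => l ≠ "")) <;>
        cases fb <;>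
        simp [pvOnePass, pvScanDiag, pvScanFallback, h0, ih] <;>
        split_ifs <;>
        simp_all

-- ===== VERDICT (by name: the statement is the Claim_ definition above) =====
theorem extract_diagnosis_summary_spec : Claim_equal_extract_diagnosis_summary := by
  intro text _
  unfold Spec_extract_diagnosis_summary extract_diagnosis_summary extract_diagnosis_summary_alt
  rw [pvOnePass_eq]
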